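-- pv_equiv track=rewrite | github.com/njmuggio/aoc2024 | 22/p2.py | build_signal_map
-- ===== SOURCE A (Python) =====
-- def build_signal_map(seed, iters):
--   cost_history = [None, None, None, None, seed % 10]
--   signal_map = {}
--   for i in range(iters):
--     seed = (seed ^ (seed << 6)) & 0xFFFFFF
--     seed = ((seed >> 5) ^ seed) & 0xFFFFFF
--     seed = ((seed << 11) ^ seed) & 0xFFFFFF
--
--     cost_history[0] = cost_history[1]
--     cost_history[1] = cost_history[2]
--     cost_history[2] = cost_history[3]
--     cost_history[3] = cost_history[4]
--     cost_history[4] = seed % 10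
--
--     if i >= 3 and seed % 10 > 0:
--       a = cost_history[1] - cost_history[0]
--       b = cost_history[2] - cost_history[1]
--       c = cost_history[3] - cost_history[2]
--       d = cost_history[4] - cost_history[3]
--       if a not in signal_map:
--         signal_map[a] = {}
--       if b not in signal_map[a]:
--         signal_map[a][b] = {}
--       if c not in signal_map[a][b]:
--         signal_map[a][b][c] = {}
--       if d not in signal_map[a][b][c]:
--         signal_map[a][b][c][d] = seed % 10
--   return signal_map
-- ===== SOURCE B (Python) =====
-- def build_signal_map(seed, iters):
--   prices = [seed % 10]
--   for _ in range(iters):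
--     seed = (seed ^ (seed << 6)) & 0xFFFFFF
--     seed = ((seed >> 5) ^ seed) & 0xFFFFFF
--     seed = ((seed << 11) ^ seed) & 0xFFFFFF
--     prices.append(seed % 10)
--   signal_map = {}
--   for j in range(4, len(prices)):
--     if prices[j] > 0:
--       a = prices[j - 3] - prices[j - 4]
--       b = prices[j - 2] - prices[j - 3]
--       c = prices[j - 1] - prices[j - 2]
--       d = prices[j] - prices[j - 1]
--       signal_map.setdefault(a, {}).setdefault(b, {}).setdefault(c, {}).setdefault(d, prices[j])
--   return signal_map
-- ===== Notes on version B (the rewrite author's own statement) =====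
-- stated objective: alternative
-- what changed: A interleaves PRNG stepping, a 5-slot sliding cost-history and first-seen nested-dict insertion in one loop; B decomposes it into two passes: first collect the whole price sequence into a list, then slide a window over indices 4..len-1 and insert each positive-price window via a setdefault chain.
import Mathlib
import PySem

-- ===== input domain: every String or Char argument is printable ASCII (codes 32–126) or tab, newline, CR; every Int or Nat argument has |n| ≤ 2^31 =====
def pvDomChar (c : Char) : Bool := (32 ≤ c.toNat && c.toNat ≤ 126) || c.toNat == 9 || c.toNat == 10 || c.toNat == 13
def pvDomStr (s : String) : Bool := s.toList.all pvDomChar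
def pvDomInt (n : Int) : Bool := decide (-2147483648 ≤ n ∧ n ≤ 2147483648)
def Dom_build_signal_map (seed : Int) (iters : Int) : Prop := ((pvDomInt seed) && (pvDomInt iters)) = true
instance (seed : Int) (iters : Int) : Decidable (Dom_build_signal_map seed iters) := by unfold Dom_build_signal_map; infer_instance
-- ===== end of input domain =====

-- B rebuilds the result from a first-collected price list in a second window pass (different decomposition); return values proved equal, no speed claim.

-- ===== PORT A =====
-- nested signal map type and Python-dict primitives on Int-keyed association lists
-- (first-match lookup, overwrite-in-place / append insert — exact for Python dicts)
abbrev SM4 : Type := List (Int × List (Int × List (Int × List (Int × Int))))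

def pvGet? {α : Type} (m : List (Int × α)) (k : Int) : Option α :=
  match m with
  | [] => none
  | (k', v) :: t => if k' = k then some v else pvGet? t k

def pvGetD {α : Type} (m : List (Int × α)) (k : Int) (dflt : α) : α :=
  (pvGet? m k).getD dflt

def pvSet {α : Type} (m : List (Int × α)) (k : Int) (v : α) : List (Int × α) :=
  match m with
  | [] => [(k, v)]
  | (k', v') :: t => if k' = k then (k', v) :: t else (k', v') :: pvSet t k v

-- cost_history is a fixed 5-slot list: ported as a 5-tuple of Option Int ([None,...,seed%10]).
-- Its entries are read only under the guard i >= 3, where all of them are `some`,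
-- so the `.getD 0` rendering of the reads never sees its default.
def aStep (st : Int × (Option Int × Option Int × Option Int × Option Int × Option Int) × SM4) (i : Int) :
    Int × (Option Int × Option Int × Option Int × Option Int × Option Int) × SM4 :=
  let seed := st.1
  let ch := st.2.1
  let m := st.2.2
  let seed := PySem.Int.band (PySem.Int.bxor seed (seed <<< 6)) 0xFFFFFF
  let seed := PySem.Int.band (PySem.Int.bxor (seed >>> 5) seed) 0xFFFFFF
  let seed := PySem.Int.band (PySem.Int.bxor (seed <<< 11) seed) 0xFFFFFF
  let ch := (ch.2.1, ch.2.2.1, ch.2.2.2.1, ch.2.2.2.2, some (PySem.Int.mod seed 10))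
  let m :=
    if 3 ≤ i ∧ 0 < PySem.Int.mod seed 10 then
      let a := ch.2.1.getD 0 - ch.1.getD 0
      let b := ch.2.2.1.getD 0 - ch.2.1.getD 0
      let c := ch.2.2.2.1.getD 0 - ch.2.2.1.getD 0
      let d := (ch.2.2.2.2).getD 0 - ch.2.2.2.1.getD 0
      -- 'if a not in signal_map: signal_map[a] = {}', then reads/mutations through the
      -- aliases signal_map[a], signal_map[a][b], signal_map[a][b][c], written back with pvSet
      let m1 := if (pvGet? m a).isNone then pvSet m a [] else m
      let ma := pvGetD m1 a []
      let ma1 := if (pvGet? ma b).isNone then pvSet ma b [] else ma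
      let mb := pvGetD ma1 b []
      let mb1 := if (pvGet? mb c).isNone then pvSet mb c [] else mb
      let mc := pvGetD mb1 c []
      let mc1 := if (pvGet? mc d).isNone then pvSet mc d (PySem.Int.mod seed 10) else mc
      pvSet m1 a (pvSet ma1 b (pvSet mb1 c mc1))
    else m
  (seed, ch, m)

def build_signal_map (seed : Int) (iters : Int) : List (Int × List (Int × List (Int × List (Int × Int)))) :=
  ((PySem.List.pyRange 0 iters 1).foldl aStep
    (seed, (none, none, none, none, some (PySem.Int.mod seed 10)), ([] : SM4))).2.2

-- ===== PORT B =====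
-- d.setdefault(k, dflt) followed by in-place mutation f of the returned value:
-- overwrite entry k (in place) with f of its current value, defaulting to dflt; append if absent
def pvUpd {α : Type} (m : List (Int × α)) (k : Int) (dflt : α) (f : α → α) : List (Int × α) :=
  match m with
  | [] => [(k, f dflt)]
  | (k', v) :: t => if k' = k then (k', f v) :: t else (k', v) :: pvUpd t k dflt f

-- signal_map.setdefault(a, {}).setdefault(b, {}).setdefault(c, {}).setdefault(d, v)
def insertWindow (m : SM4) (a b c d v : Int) : SM4 :=
  pvUpd m a [] (fun ma => pvUpd ma b [] (fun mb => pvUpd mb c [] (fun mc => pvUpd mc d v id)))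

def bPriceStep (st : Int × List Int) (_i : Int) : Int × List Int :=
  let seed := st.1
  let seed := PySem.Int.band (PySem.Int.bxor seed (seed <<< 6)) 0xFFFFFF
  let seed := PySem.Int.band (PySem.Int.bxor (seed >>> 5) seed) 0xFFFFFF
  let seed := PySem.Int.band (PySem.Int.bxor (seed <<< 11) seed) 0xFFFFFF
  (seed, st.2 ++ [PySem.Int.mod seed 10])

-- `prices[j]` for j in range(4, len(prices)) is always in range, so pyGetD's default is never read
def bWindowStep (prices : List Int) (m : SM4) (j : Int) : SM4 :=
  if 0 < PySem.List.pyGetD prices j 0 then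
    insertWindow m
      (PySem.List.pyGetD prices (j - 3) 0 - PySem.List.pyGetD prices (j - 4) 0)
      (PySem.List.pyGetD prices (j - 2) 0 - PySem.List.pyGetD prices (j - 3) 0)
      (PySem.List.pyGetD prices (j - 1) 0 - PySem.List.pyGetD prices (j - 2) 0)
      (PySem.List.pyGetD prices j 0 - PySem.List.pyGetD prices (j - 1) 0)
      (PySem.List.pyGetD prices j 0)
  else m

def build_signal_map_alt (seed : Int) (iters : Int) : List (Int × List (Int × List (Int × List (Int × Int)))) :=
  let prices := ((PySem.List.pyRange 0 iters 1).foldl bPriceStep (seed, [PySem.Int.mod seed 10])).2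
  (PySem.List.pyRange 4 (prices.length : Int) 1).foldl (bWindowStep prices) []

-- ===== PRECONDITION & SPEC =====
def Spec_build_signal_map (seed : Int) (iters : Int) (out : List (Int × List (Int × List (Int × List (Int × Int))))) : Prop := out = build_signal_map_alt seed iters
instance (seed : Int) (iters : Int) (out : List (Int × List (Int × List (Int × List (Int × Int))))) : Decidable (Spec_build_signal_map seed iters out) := by
  unfold Spec_build_signal_map
  have d1 : DecidableEq (List (Int × Int)) :=
    @instDecidableEqList _ (@instDecidableEqProd _ _ inferInstance inferInstance)
  have d2 : DecidableEq (List (Int × List (Int × Int))) :=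
    @instDecidableEqList _ (@instDecidableEqProd _ _ inferInstance d1)
  have d3 : DecidableEq (List (Int × List (Int × List (Int × Int)))) :=
    @instDecidableEqList _ (@instDecidableEqProd _ _ inferInstance d2)
  exact @instDecidableEqList _ (@instDecidableEqProd _ _ inferInstance d3) _ _

-- ===== CLAIM (what is proved, stated in full; the proofs are below) =====
def Claim_equal_build_signal_map : Prop := ∀ (seed : Int) (iters : Int), Dom_build_signal_map seed iters → Spec_build_signal_map seed iters (build_signal_map seed iters)

-- ===== LEMMAS AND PROOFS =====

-- one PRNG round (the three masked xor-shift assignments, shared verbatim by both ports)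
def prng (s : Int) : Int :=
  let s1 := PySem.Int.band (PySem.Int.bxor s (s <<< 6)) 0xFFFFFF
  let s2 := PySem.Int.band (PySem.Int.bxor (s1 >>> 5) s1) 0xFFFFFF
  PySem.Int.band (PySem.Int.bxor (s2 <<< 11) s2) 0xFFFFFF

def sIter (seed : Int) : Nat → Int
  | 0 => seed
  | n + 1 => prng (sIter seed n)

def price (seed : Int) (k : Nat) : Int := PySem.Int.mod (sIter seed k) 10

def ph (seed : Int) (k : Int) : Option Int :=
  if k < 0 then none else some (price seed k.toNat)

def chT (seed : Int) (n : Nat) : Option Int × Option Int × Option Int × Option Int × Option Int :=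
  (ph seed ((n : Int) - 4), ph seed ((n : Int) - 3), ph seed ((n : Int) - 2), ph seed ((n : Int) - 1), ph seed (n : Int))

def wInsI (seed : Int) (m : SM4) (j : Int) : SM4 :=
  if 0 < price seed j.toNat then
    insertWindow m
      (price seed (j - 3).toNat - price seed (j - 4).toNat)
      (price seed (j - 2).toNat - price seed (j - 3).toNat)
      (price seed (j - 1).toNat - price seed (j - 2).toNat)
      (price seed j.toNat - price seed (j - 1).toNat)
      (price seed j.toNat)
  else m

def bMap (seed : Int) : Nat → SM4
  | 0 => []
  | n + 1 => if 4 ≤ n + 1 then wInsI seed (bMap seed n) ((n : Int) + 1) else []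

-- association-list facts
lemma pvGet?_set_self {α : Type} (m : List (Int × α)) (k : Int) (v : α) :
    pvGet? (pvSet m k v) k = some v := by
  induction m with
  | nil => simp [pvSet, pvGet?]
  | cons h t ih => obtain ⟨k', v'⟩ := h; by_cases hk : k' = k <;> simp [pvSet, pvGet?, hk, ih]

lemma pvSet_set_self {α : Type} (m : List (Int × α)) (k : Int) (v w : α) :
    pvSet (pvSet m k v) k w = pvSet m k w := by
  induction m with
  | nil => simp [pvSet]
  | cons h t ih => obtain ⟨k', v'⟩ := h; by_cases hk : k' = k <;> simp [pvSet, hk, ih]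

lemma pvUpd_of_none {α : Type} (m : List (Int × α)) (k : Int) (dflt : α) (g : α → α)
    (h : pvGet? m k = none) : pvUpd m k dflt g = pvSet m k (g dflt) := by
  induction m with
  | nil => simp [pvUpd, pvSet]
  | cons hd t ih =>
    obtain ⟨k', v'⟩ := hd
    by_cases hk : k' = k <;> simp_all [pvUpd, pvSet, pvGet?, hk]

lemma pvUpd_of_some {α : Type} (m : List (Int × α)) (k : Int) (dflt : α) (g : α → α) (w : α)
    (h : pvGet? m k = some w) : pvUpd m k dflt g = pvSet m k (g w) := by
  induction m with
  | nil => simp [pvGet?] at h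
  | cons hd t ih =>
    obtain ⟨k', v'⟩ := hd
    by_cases hk : k' = k <;> simp_all [pvUpd, pvSet, pvGet?, hk]

lemma pvSet_get_self {α : Type} (m : List (Int × α)) (k : Int) (w : α)
    (h : pvGet? m k = some w) : pvSet m k w = m := by
  induction m with
  | nil => simp [pvGet?] at h
  | cons hd t ih =>
    obtain ⟨k', v'⟩ := hd
    by_cases hk : k' = k <;> simp_all [pvSet, pvGet?, hk]

lemma upd_id_ensure {α : Type} (m : List (Int × α)) (k : Int) (v : α) :
    (if (pvGet? m k).isNone then pvSet m k v else m) = pvUpd m k v id := by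
  cases h : pvGet? m k with
  | none => simp [h, pvUpd_of_none m k v id h]
  | some w =>
    simp only [h, Option.isNone_some, Bool.false_eq_true, if_false, pvUpd_of_some m k v id w h,
      id, pvSet_get_self m k w h]

lemma pyRange_zero_toNat (iters : Int) :
    PySem.List.pyRange 0 iters 1 = PySem.List.pyRange 0 (iters.toNat : Int) 1 := by
  by_cases h : 0 ≤ iters
  · rw [Int.toNat_of_nonneg h]
  · rw [PySem.List.pyRange_one_eq_nil (by omega), PySem.List.pyRange_one_eq_nil (by omega)]

lemma bMap_eq_nil (seed : Int) (n : Nat) (h : n ≤ 3) : bMap seed n = [] := by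
  match n with
  | 0 => rfl
  | m + 1 => simp only [bMap]; rw [if_neg (by omega)]

lemma ensure_spec {α : Type} (m : List (Int × α)) (k : Int) (dflt : α) :
    ∃ w, pvGetD (if (pvGet? m k).isNone then pvSet m k dflt else m) k dflt = w ∧
      (if (pvGet? m k).isNone then pvSet m k dflt else m) = pvSet m k w ∧
      ∀ g : α → α, pvUpd m k dflt g = pvSet m k (g w) := by
  cases h : pvGet? m k with
  | none =>
    exact ⟨dflt, by simp [h, pvGetD, pvGet?_set_self], by simp [h],
      fun g => pvUpd_of_none m k dflt g h⟩
  | some w =>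
    exact ⟨w, by simp [h, pvGetD], by simp [h, pvSet_get_self m k w h],
      fun g => pvUpd_of_some m k dflt g w h⟩

-- A's inline nested-dict insertion chain, named so the proof can refer to it
-- (definitionally equal to the let-chain inside aStep)
def chainExpr (m : SM4) (a b c d v : Int) : SM4 :=
  let m1 := if (pvGet? m a).isNone then pvSet m a [] else m
  let ma := pvGetD m1 a []
  let ma1 := if (pvGet? ma b).isNone then pvSet ma b [] else ma
  let mb := pvGetD ma1 b []
  let mb1 := if (pvGet? mb c).isNone then pvSet mb c [] else mb
  let mc := pvGetD mb1 c []
  let mc1 := if (pvGet? mc d).isNone then pvSet mc d v else mc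
  pvSet m1 a (pvSet ma1 b (pvSet mb1 c mc1))

lemma chainA_eq (m : SM4) (a b c d v : Int) :
    chainExpr m a b c d v = insertWindow m a b c d v := by
  unfold chainExpr
  simp only [insertWindow]
  obtain ⟨wa, ha2, ha1, ha3⟩ := ensure_spec m a []
  rw [ha2, ha1, pvSet_set_self, ha3]
  congr 1
  obtain ⟨wb, hb2, hb1, hb3⟩ := ensure_spec wa b []
  rw [hb2, hb1, pvSet_set_self, hb3]
  congr 1
  obtain ⟨wc, hc2, hc1, hc3⟩ := ensure_spec wb c []
  rw [hc2, hc1, pvSet_set_self, hc3]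
  congr 1
  exact upd_id_ensure wc d v

lemma chT_succ (seed : Int) (n : Nat) :
    chT seed (n + 1) = ((chT seed n).2.1, (chT seed n).2.2.1, (chT seed n).2.2.2.1,
      (chT seed n).2.2.2.2, some (price seed (n + 1))) := by
  have e1 : ((n + 1 : Nat) : Int) - 4 = (n : Int) - 3 := by push_cast; ring
  have e2 : ((n + 1 : Nat) : Int) - 3 = (n : Int) - 2 := by push_cast; ring
  have e3 : ((n + 1 : Nat) : Int) - 2 = (n : Int) - 1 := by push_cast; ring
  have e4 : ((n + 1 : Nat) : Int) - 1 = (n : Int) := by push_cast; ring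
  simp only [chT, e1, e2, e3, e4]
  have h5 : ph seed ((n + 1 : Nat) : Int) = some (price seed (n + 1)) := by
    simp only [ph, Int.toNat_natCast]
    rw [if_neg (by push_cast; omega)]
  rw [h5]

lemma aStep_eq (seed : Int) (n : Nat) :
    aStep (sIter seed n, chT seed n, bMap seed n) (n : Int) =
      (sIter seed (n + 1), chT seed (n + 1), bMap seed (n + 1)) := by
  refine Prod.ext ?_ (Prod.ext ?_ ?_)
  · rfl
  · show ((chT seed n).2.1, (chT seed n).2.2.1, (chT seed n).2.2.2.1, (chT seed n).2.2.2.2,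
        some (price seed (n + 1))) = chT seed (n + 1)
    rw [chT_succ]
  · show (if 3 ≤ (n : Int) ∧ 0 < price seed (n + 1) then
        chainExpr (bMap seed n)
          (((chT seed n).2.2.1).getD 0 - ((chT seed n).2.1).getD 0)
          (((chT seed n).2.2.2.1).getD 0 - ((chT seed n).2.2.1).getD 0)
          (((chT seed n).2.2.2.2).getD 0 - ((chT seed n).2.2.2.1).getD 0)
          (price seed (n + 1) - ((chT seed n).2.2.2.2).getD 0)
          (price seed (n + 1))
      else bMap seed n) = bMap seed (n + 1)
    by_cases h3 : 3 ≤ n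
    · have g1 : ((chT seed n).2.1).getD 0 = price seed (n - 3) := by
        simp only [chT, ph]
        rw [if_neg (by omega), Option.getD_some]
        congr 1 <;> omega
      have g2 : ((chT seed n).2.2.1).getD 0 = price seed (n - 2) := by
        simp only [chT, ph]
        rw [if_neg (by omega), Option.getD_some]
        congr 1 <;> omega
      have g3 : ((chT seed n).2.2.2.1).getD 0 = price seed (n - 1) := by
        simp only [chT, ph]
        rw [if_neg (by omega), Option.getD_some]
        congr 1 <;> omega
      have g4 : ((chT seed n).2.2.2.2).getD 0 = price seed n := by
        simp only [chT, ph]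
        rw [if_neg (by omega), Option.getD_some]
        congr 1 <;> omega
      have h3' : (3 : Int) ≤ (n : Int) := by exact_mod_cast h3
      by_cases hp : 0 < price seed (n + 1)
      · rw [if_pos ⟨h3', hp⟩, g1, g2, g3, g4, chainA_eq]
        simp only [bMap]
        rw [if_pos (by omega)]
        unfold wInsI
        rw [show (((n : Int) + 1)).toNat = n + 1 from by omega,
          show ((n : Int) + 1 - 3).toNat = n - 2 from by omega,
          show ((n : Int) + 1 - 4).toNat = n - 3 from by omega,
          show ((n : Int) + 1 - 2).toNat = n - 1 from by omega,
          show ((n : Int) + 1 - 1).toNat = n from by omega,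
          if_pos hp]
      · rw [if_neg (fun h => hp h.2)]
        simp only [bMap]
        rw [if_pos (by omega)]
        unfold wInsI
        rw [show (((n : Int) + 1)).toNat = n + 1 from by omega, if_neg hp]
    · rw [if_neg (fun h => h3 (by exact_mod_cast h.1))]
      rw [bMap_eq_nil seed n (by omega), bMap_eq_nil seed (n + 1) (by omega)]

lemma aFold (seed : Int) (n : Nat) :
    (PySem.List.pyRange 0 (n : Int) 1).foldl aStep
      (seed, (none, none, none, none, some (PySem.Int.mod seed 10)), ([] : SM4)) =
    (sIter seed n, chT seed n, bMap seed n) := by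
  induction n with
  | zero =>
    rw [show ((0 : Nat) : Int) = 0 by norm_num, PySem.List.pyRange_one_eq_nil le_rfl]
    rfl
  | succ n ih =>
    rw [show ((n + 1 : Nat) : Int) = (n : Int) + 1 by push_cast; ring,
      PySem.List.pyRange_one_succ_right (by positivity), List.foldl_append, ih]
    simp only [List.foldl_cons, List.foldl_nil]
    exact aStep_eq seed n

lemma bPrices (seed : Int) (n : Nat) :
    (PySem.List.pyRange 0 (n : Int) 1).foldl bPriceStep (seed, [PySem.Int.mod seed 10]) =
      (sIter seed n, (List.range (n + 1)).map (price seed)) := by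
  induction n with
  | zero =>
    rw [show ((0 : Nat) : Int) = 0 by norm_num, PySem.List.pyRange_one_eq_nil le_rfl]
    simp only [List.foldl_nil, List.range_succ, List.range_zero, List.map_cons, List.map_nil,
      List.nil_append]
    rfl
  | succ n ih =>
    rw [show ((n + 1 : Nat) : Int) = (n : Int) + 1 by push_cast; ring,
      PySem.List.pyRange_one_succ_right (by positivity), List.foldl_append, ih]
    simp only [List.foldl_cons, List.foldl_nil, bPriceStep]
    rw [List.range_succ (n := n + 1), List.map_append]
    rfl

lemma getPrices (seed : Int) (n : Nat) (j : Int) (h0 : 0 ≤ j) (h1 : j ≤ (n : Int)) :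
    PySem.List.pyGetD ((List.range (n + 1)).map (price seed)) j 0 = price seed j.toNat := by
  rw [PySem.List.pyGetD_eq_getElem _ _ h0 (by simp; omega)]
  simp

lemma windFold (seed : Int) (n : Nat) :
    (PySem.List.pyRange 4 ((n : Int) + 1) 1).foldl (wInsI seed) [] = bMap seed n := by
  induction n with
  | zero => rw [PySem.List.pyRange_one_eq_nil (by norm_num)]; rfl
  | succ n ih =>
    by_cases h : 4 ≤ n + 1
    · rw [show ((n + 1 : Nat) : Int) + 1 = ((n : Int) + 1) + 1 by push_cast; ring,
        PySem.List.pyRange_one_succ_right (by omega), List.foldl_append, ih]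
      simp only [List.foldl_cons, List.foldl_nil, bMap]
      rw [if_pos h]
    · rw [PySem.List.pyRange_one_eq_nil (by push_cast; omega)]
      simp only [List.foldl_nil, bMap]
      rw [if_neg h]

lemma bWindows (seed : Int) (n : Nat) :
    (PySem.List.pyRange 4 ((n : Int) + 1) 1).foldl
        (bWindowStep ((List.range (n + 1)).map (price seed))) [] = bMap seed n := by
  rw [PySem.List.foldl_congr_mem _ _ (wInsI seed) _ ?_, windFold]
  intro acc j hj
  rw [PySem.List.mem_pyRange_one] at hj
  unfold bWindowStep wInsI
  rw [getPrices seed n j (by omega) (by omega),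
    getPrices seed n (j - 1) (by omega) (by omega),
    getPrices seed n (j - 2) (by omega) (by omega),
    getPrices seed n (j - 3) (by omega) (by omega),
    getPrices seed n (j - 4) (by omega) (by omega)]

-- ===== VERDICT (by name: the statement is the Claim_ definition above) =====
theorem build_signal_map_spec : Claim_equal_build_signal_map := by
  intro seed iters _
  show build_signal_map seed iters = build_signal_map_alt seed iters
  unfold build_signal_map build_signal_map_alt
  rw [pyRange_zero_toNat, aFold, bPrices]
  simp only [List.length_map, List.length_range]
  rw [show ((iters.toNat + 1 : Nat) : Int) = (iters.toNat : Int) + 1 by push_cast; ring,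
    bWindows]
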